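-- pv_equiv track=rewrite | github.com/Reincarnatiopedia/wikidata-bot | wikidata_warmup.py | _find_best_pattern
-- ===== SOURCE A (Python) =====
-- from typing import Optional
--
-- def _find_best_pattern(en_desc_lower: str, translation_dict: dict) -> Optional[str]:
--     """
--     Matching strategy for quality descriptions:
--     1. EXACT match (en_desc == pattern): translate directly
--     2. NEAR-EXACT (en_desc starts with pattern, rest is short): translate
--     3. COMPOSITE (en_desc has prefix like "type of X"): handled by template logic
--     4. Otherwise: return None (let LLM handle or skip)
--
--     This prevents generic translations like "artificial intelligence" for items
--     whose EN description contains more specific context.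
--     """
--     stripped = en_desc_lower.strip()
--     sorted_patterns = sorted(translation_dict.keys(), key=len, reverse=True)
--
--     for pattern in sorted_patterns:
--         # Exact match — best case
--         if stripped == pattern:
--             return translation_dict[pattern]
--         # Near-exact: description IS the pattern with minor extras (year, parenthetical)
--         # e.g. "machine learning (computer science)" or "algorithm (2019)"
--         if stripped.startswith(pattern):
--             rest = stripped[len(pattern):].strip()
--             # Only allow short suffixes like "(2019)" or " system"
--             if len(rest) < 20 and (rest.startswith("(") or rest.startswith(",")):
--                 return translation_dict[pattern]
--
--     # No good match — don't force a generic translation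
--     return None
-- ===== SOURCE B (Python) =====
-- from typing import Optional
--
-- def _find_best_pattern(en_desc_lower: str, translation_dict: dict) -> Optional[str]:
--     # B: no sorting, no scan over all patterns. The only strings that can match are
--     # prefixes of the description itself, so: one exact dict lookup, then one backward
--     # scan over cut positions, keeping the index of the next non-space character so the
--     # suffix test is O(1), with a dict lookup only at qualifying cuts.
--     stripped = en_desc_lower.strip()
--     v = translation_dict.get(stripped)
--     if v is not None:
--         return v
--     nxt = len(stripped)  # index of the first non-space character at or after the cut
--     for k in range(len(stripped) - 1, -1, -1):
--         if not stripped[k].isspace():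
--             nxt = k
--         # the suffix stripped[k:].strip() is stripped[nxt:]; it qualifies iff it is
--         # short (< 20 chars) and starts with "(" or ","
--         if len(stripped) - nxt < 20 and stripped[nxt] in "(,":
--             v = translation_dict.get(stripped[:k])
--             if v is not None:
--                 return v
--     return None
-- ===== Notes on version B (the rewrite author's own statement) =====
-- stated objective: alternative
-- what changed: Instead of sorting all dictionary keys by length and scanning them with startswith, B inverts the search: one exact dict lookup for the stripped description, then one backward scan over its cut positions maintaining the next non-space index, looking up only the prefixes whose suffix qualifies ('(' or ',' after stripping, < 20 chars); cost is independent of the dictionary size.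
import Mathlib
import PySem

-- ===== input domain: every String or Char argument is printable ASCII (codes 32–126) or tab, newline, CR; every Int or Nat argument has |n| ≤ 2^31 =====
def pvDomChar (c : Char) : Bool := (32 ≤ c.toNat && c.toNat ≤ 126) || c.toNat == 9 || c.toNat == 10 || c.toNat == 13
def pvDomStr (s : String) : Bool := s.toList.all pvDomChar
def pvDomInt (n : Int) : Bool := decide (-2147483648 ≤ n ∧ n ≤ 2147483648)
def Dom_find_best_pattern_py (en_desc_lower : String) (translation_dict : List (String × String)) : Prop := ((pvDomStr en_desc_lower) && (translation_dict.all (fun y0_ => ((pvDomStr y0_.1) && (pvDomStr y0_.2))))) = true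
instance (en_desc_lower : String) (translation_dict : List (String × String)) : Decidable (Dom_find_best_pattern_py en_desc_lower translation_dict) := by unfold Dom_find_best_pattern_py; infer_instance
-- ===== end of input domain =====

-- B replaces A's sort-all-keys-and-scan search by one exact dict lookup plus a single
-- backward scan over the description's own cut positions (objective: alternative —
-- dict lookups on the description's prefixes instead of a pass over all patterns).

-- ===== PORT A =====
-- the near-exact suffix test both Pythons spell out inline: rest = stripped[k:].strip();
-- len(rest) < 20 and (rest.startswith("(") or rest.startswith(","))
def pvNearCond (stripped : String) (k : Int) : Bool :=
  let rest := PySem.Str.strip (PySem.Str.slice stripped (some k) none)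
  decide (PySem.Str.len rest < 20) &&
    (PySem.Str.startswith rest "(" || PySem.Str.startswith rest ",")

-- A's for-loop over the length-sorted pattern list
def pvLoopA (stripped : String) (d : PySem.Dict String String) : List String → Option String
  | [] => none
  | p :: ps =>
    if stripped == p then d.get? p
    else if PySem.Str.startswith stripped p then
      if pvNearCond stripped (PySem.Str.len p) then d.get? p else pvLoopA stripped d ps
    else pvLoopA stripped d ps

def find_best_pattern_py (en_desc_lower : String) (translation_dict : List (String × String)) : Option String :=
  let d := PySem.Dict.ofList translation_dict
  let stripped := PySem.Str.strip en_desc_lower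
  pvLoopA stripped d (PySem.List.sorted d.keys (fun p => PySem.Str.len p) true)

-- ===== PORT B =====
-- B's backward for-loop over cut positions k = len-1, …, 0; nxt is the index of the
-- first non-space character at or after k (so stripped[k:].strip() is stripped[nxt:])
def pvLoopB (stripped : String) (d : PySem.Dict String String) : Nat → Nat → Option String
  | _, 0 => none
  | nxt, k+1 =>
    let nxt' : Nat := match PySem.Str.pyGet? stripped (k : Int) with
      | some c => if PySem.Chars.isspace c then nxt else k
      | none => nxt
    let hit := decide (PySem.Str.len stripped - (nxt' : Int) < 20) &&
      (match PySem.Str.pyGet? stripped (nxt' : Int) with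
       | some c => c == '(' || c == ','
       | none => false)
    if hit then
      match d.get? (PySem.Str.slice stripped none (some (k : Int))) with
      | some v => some v
      | none => pvLoopB stripped d nxt' k
    else pvLoopB stripped d nxt' k

def find_best_pattern_py_alt (en_desc_lower : String) (translation_dict : List (String × String)) : Option String :=
  let d := PySem.Dict.ofList translation_dict
  let stripped := PySem.Str.strip en_desc_lower
  match d.get? stripped with
  | some v => some v
  | none => pvLoopB stripped d (PySem.Str.len stripped).toNat (PySem.Str.len stripped).toNat

-- ===== PRECONDITION & SPEC =====
def Spec_find_best_pattern_py (en_desc_lower : String) (translation_dict : List (String × String)) (out : Option String) : Prop := out = find_best_pattern_py_alt en_desc_lower translation_dict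
instance (en_desc_lower : String) (translation_dict : List (String × String)) (out : Option String) : Decidable (Spec_find_best_pattern_py en_desc_lower translation_dict out) := by unfold Spec_find_best_pattern_py; infer_instance

-- ===== CLAIM (what is proved, stated in full; the proofs are below) =====
def Claim_equal_find_best_pattern_py : Prop := ∀ (en_desc_lower : String) (translation_dict : List (String × String)), Dom_find_best_pattern_py en_desc_lower translation_dict → Spec_find_best_pattern_py en_desc_lower translation_dict (find_best_pattern_py en_desc_lower translation_dict)

-- ===== LEMMAS AND PROOFS =====

-- reference countdown over prefix lengths: the largest qualifying prefix wins
def pvSpecLoop (stripped : String) (d : PySem.Dict String String) : Nat → Option String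
  | 0 => none
  | k+1 =>
    if pvNearCond stripped (k : Int) then
      match d.get? (PySem.Str.slice stripped none (some (k : Int))) with
      | some v => some v
      | none => pvSpecLoop stripped d k
    else pvSpecLoop stripped d k


-- the prefix of S of length n, as B's port spells it
def pvTake (S : String) (n : Nat) : String := PySem.Str.slice S none (some (n : Int))

theorem pvTake_toList (S : String) (n : Nat) : (pvTake S n).toList = S.toList.take n := by
  simp [pvTake, PySem.Str.toList_slice, PySem.Chars.slice_eq_listSlice, PySem.List.slice_to_natCast]

theorem pvStartswith_iff (S p : String) :
    PySem.Str.startswith S p = true ↔ p.toList <+: S.toList := by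
  rw [PySem.Str.startswith_eq, PySem.Chars.startswith_iff]

theorem pvPrefix_eq_take (S p : String) (h : p.toList <+: S.toList) :
    p = pvTake S p.toList.length := by
  apply String.toList_inj.mp
  rw [pvTake_toList]
  exact List.prefix_iff_eq_take.mp h

theorem pvLen_eq (p : String) : PySem.Str.len p = (p.toList.length : Int) := PySem.Str.len_eq p

-- if no qualifying prefix below k is in the dict, B's loop returns none
theorem pvSpecLoop_none (S : String) (d : PySem.Dict String String) (k : Nat)
    (h : ∀ n < k, pvNearCond S (n : Int) = true → d.get? (pvTake S n) = none) :
    pvSpecLoop S d k = none := by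
  induction k with
  | zero => rfl
  | succ k ih =>
    rw [pvSpecLoop]
    have hk := h k (Nat.lt_succ_self k)
    by_cases hc : pvNearCond S (k : Int) = true
    · rw [if_pos hc]
      have : d.get? (PySem.Str.slice S none (some (k : Int))) = none := hk hc
      rw [this]
      exact ih (fun n hn => h n (Nat.lt_succ_of_lt hn))
    · rw [if_neg hc]
      exact ih (fun n hn => h n (Nat.lt_succ_of_lt hn))

-- B's loop returns the value at the largest qualifying prefix length m < k
theorem pvSpecLoop_ret (S : String) (d : PySem.Dict String String) (k m : Nat) (v : String)
    (hmk : m < k) (hc : pvNearCond S (m : Int) = true) (hv : d.get? (pvTake S m) = some v)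
    (habove : ∀ n, m < n → n < k → pvNearCond S (n : Int) = true → d.get? (pvTake S n) = none) :
    pvSpecLoop S d k = some v := by
  induction k with
  | zero => omega
  | succ k ih =>
    rw [pvSpecLoop]
    rcases Nat.lt_succ_iff_lt_or_eq.mp hmk with hlt | rfl
    · by_cases hck : pvNearCond S (k : Int) = true
      · rw [if_pos hck]
        have : d.get? (PySem.Str.slice S none (some (k : Int))) = none :=
          habove k hlt (Nat.lt_succ_self k) hck
        rw [this]
        exact ih hlt (fun n h1 h2 => habove n h1 (Nat.lt_succ_of_lt h2))
      · rw [if_neg hck]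
        exact ih hlt (fun n h1 h2 => habove n h1 (Nat.lt_succ_of_lt h2))
    · rw [if_pos hc]
      have : d.get? (PySem.Str.slice S none (some (m : Int))) = some v := hv
      rw [this]

-- A's loop on a length-descending list containing S itself returns S's translation
theorem pvLoopA_exact (S : String) (d : PySem.Dict String String) (ps : List String)
    (hpw : ps.Pairwise (fun a b => PySem.Str.len b ≤ PySem.Str.len a))
    (hmem : S ∈ ps) :
    pvLoopA S d ps = d.get? S := by
  induction ps with
  | nil => simp at hmem
  | cons p tl ih =>
    rw [pvLoopA]
    by_cases hps : S = p
    · subst hps; simp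
    · have hSm : S ∈ tl := by
        rcases List.mem_cons.mp hmem with h | h
        · exact absurd h hps
        · exact h
      have hlen : PySem.Str.len S ≤ PySem.Str.len p := (List.pairwise_cons.mp hpw).1 S hSm
      have hbeq : (S == p) = false := by
        simp [hps]
      rw [hbeq]
      simp only [Bool.false_eq_true, if_false]
      have hsw : PySem.Str.startswith S p = false := by
        by_contra hx
        have hx' : PySem.Str.startswith S p = true := by
          cases hxx : PySem.Str.startswith S p
          · exact absurd hxx hx
          · rfl
        have hpre : p.toList <+: S.toList := (pvStartswith_iff S p).mp hx'
        have : p = S := String.toList_inj.mp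
          (hpre.eq_of_length (by
            have h1 : p.toList.length ≤ S.toList.length := hpre.length_le
            have h2 : (S.toList.length : Int) ≤ (p.toList.length : Int) := by
              simpa [pvLen_eq] using hlen
            omega))
        exact hps this.symm
      rw [hsw]
      simp only [Bool.false_eq_true, if_false]
      exact ih (List.pairwise_cons.mp hpw).2 hSm

-- A's loop ≡ B's countdown when S itself is not a key
theorem pvLoopA_near (S : String) (d : PySem.Dict String String) (k : Nat)
    (hS : d.get? S = none) (hk : k ≤ S.toList.length) :
    ∀ ps : List String,
    ps.Pairwise (fun a b => PySem.Str.len b ≤ PySem.Str.len a) →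
    (∀ p ∈ ps, (d.get? p).isSome) →
    (∀ n, n < k → pvNearCond S (n : Int) = true → (d.get? (pvTake S n)).isSome → pvTake S n ∈ ps) →
    (∀ p ∈ ps, PySem.Str.startswith S p = true → pvNearCond S (PySem.Str.len p) = true →
        p.toList.length < k) →
    pvLoopA S d ps = pvSpecLoop S d k := by
  intro ps
  induction ps with
  | nil =>
    intro _ _ h3 _
    rw [pvLoopA]
    symm
    apply pvSpecLoop_none
    intro n hn hc
    by_contra hne
    have hs : (d.get? (pvTake S n)).isSome := by
      cases hx : d.get? (pvTake S n)
      · exact absurd hx hne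
      · simp
    exact absurd (h3 n hn hc hs) (List.not_mem_nil)
  | cons p tl ih =>
    intro hpw h2 h3 h4
    have hpS : p ≠ S := by
      intro h
      have := h2 p List.mem_cons_self
      rw [h, hS] at this
      simp at this
    rw [pvLoopA]
    have hbeq : (S == p) = false := by simp [Ne.symm hpS]
    rw [hbeq]
    simp only [Bool.false_eq_true, if_false]
    by_cases hsw : PySem.Str.startswith S p = true
    · have hpre : p.toList <+: S.toList := (pvStartswith_iff S p).mp hsw
      set m := p.toList.length with hm
      have hmL : m < S.toList.length := by
        rcases Nat.lt_or_ge m S.toList.length with h | h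
        · exact h
        · exfalso
          exact hpS (String.toList_inj.mp (hpre.eq_of_length (le_antisymm hpre.length_le h)))
      rw [if_pos hsw]
      by_cases hc : pvNearCond S (PySem.Str.len p) = true
      · -- A returns d.get? p here
        rw [if_pos hc]
        have hmk : m < k := h4 p List.mem_cons_self hsw hc
        have hptake : p = pvTake S m := pvPrefix_eq_take S p hpre
        obtain ⟨v, hv⟩ : ∃ v, d.get? p = some v := by
          have := h2 p List.mem_cons_self
          cases hx : d.get? p
          · rw [hx] at this; simp at this
          · exact ⟨_, rfl⟩
        rw [hv]
        symm
        have hcm : pvNearCond S (m : Int) = true := by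
          rw [← hc, pvLen_eq, hm]
        apply pvSpecLoop_ret S d k m v hmk hcm (by rw [← hptake]; exact hv)
        intro n hmn hnk hcn
        by_contra hne
        have hsome : (d.get? (pvTake S n)).isSome := by
          cases hx : d.get? (pvTake S n)
          · exact absurd hx hne
          · simp
        have hmem := List.mem_cons.mp (h3 n hnk hcn hsome)
        have hlen_tn : (pvTake S n).toList.length = n := by
          rw [pvTake_toList, List.length_take]
          omega
        have htn_ne : pvTake S n ≠ p := by
          intro h
          rw [h] at hlen_tn
          omega
        have htl : pvTake S n ∈ tl := by
          rcases hmem with h | h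
          · exact absurd h htn_ne
          · exact h
        have := (List.pairwise_cons.mp hpw).1 _ htl
        rw [pvLen_eq, pvLen_eq, hlen_tn] at this
        have : n ≤ m := by exact_mod_cast this
        omega
      · rw [if_neg hc]
        apply ih (List.pairwise_cons.mp hpw).2 (fun q hq => h2 q (List.mem_cons_of_mem p hq))
        · intro n hn hcn hsome
          rcases List.mem_cons.mp (h3 n hn hcn hsome) with h | h
          · exfalso
            -- pvTake S n = p would make p qualify, contradicting hc
            have hlen_tn : (pvTake S n).toList.length = n := by
              rw [pvTake_toList, List.length_take]
              omega
            apply hc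
            rw [pvLen_eq, ← h, hlen_tn]
            exact hcn
          · exact h
        · intro q hq
          exact h4 q (List.mem_cons_of_mem p hq)
    · have hsw' : PySem.Str.startswith S p = false := by
        cases hx : PySem.Str.startswith S p
        · rfl
        · exact absurd hx hsw
      rw [hsw']
      simp only [Bool.false_eq_true, if_false]
      apply ih (List.pairwise_cons.mp hpw).2 (fun q hq => h2 q (List.mem_cons_of_mem p hq))
      · intro n hn hcn hsome
        rcases List.mem_cons.mp (h3 n hn hcn hsome) with h | h
        · exfalso
          apply hsw
          rw [← h]
          rw [pvStartswith_iff, pvTake_toList]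
          exact List.take_prefix n S.toList
        · exact h
      · intro q hq
        exact h4 q (List.mem_cons_of_mem p hq)

-- index of the first non-space character of S at or after position k (= len if none)
def pvJ0 (T : List Char) (k : Nat) : Nat :=
  if h : k < T.length then
    if PySem.Chars.isspace T[k] then pvJ0 T (k+1) else k
  else T.length
termination_by T.length - k

theorem pvJ0_bounds (T : List Char) (k : Nat) (hk : k ≤ T.length) :
    k ≤ pvJ0 T k ∧ pvJ0 T k ≤ T.length := by
  fun_induction pvJ0 T k with
  | case1 k h hsp ih => have := ih (by omega); omega
  | case2 k h hsp => omega
  | case3 k h => omega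

theorem pvJ0_last (T : List Char) : pvJ0 T T.length = T.length := by
  rw [pvJ0]
  simp

theorem pvDrop_dropWhile (T : List Char) (k : Nat) :
    (T.drop k).dropWhile PySem.Chars.isspace = T.drop (pvJ0 T k) := by
  fun_induction pvJ0 T k with
  | case1 k h hsp ih =>
    rw [List.drop_eq_getElem_cons h, List.dropWhile_cons]
    simp only [hsp, if_true]
    exact ih
  | case2 k h hsp =>
    rw [List.drop_eq_getElem_cons h, List.dropWhile_cons]
    simp [hsp]
  | case3 k h =>
    rw [List.drop_of_length_le (by omega), List.drop_of_length_le (by omega)]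
    rfl

theorem pvDropWhile_take (p : Char → Bool) (l : List Char) (h : l.dropWhile p = l) (m : Nat) :
    (l.take m).dropWhile p = l.take m := by
  cases l with
  | nil => simp
  | cons c t =>
    have hc : p c = false := by
      by_contra hx
      have hc' : p c = true := by
        cases hy : p c
        · exact absurd hy hx
        · rfl
      rw [List.dropWhile_cons, hc', if_pos rfl] at h
      have := List.length_dropWhile_le p t
      rw [h] at this
      simp at this
    cases m with
    | zero => simp
    | succ m =>
      rw [List.take_succ_cons, List.dropWhile_cons, hc]
      simp

-- at a cut k < len, A's inline suffix test equals B's O(1) test at nxt' = pvJ0 k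
theorem pvNearCond_eq_hit (S : String)
    (hS : S.toList.reverse.dropWhile PySem.Chars.isspace = S.toList.reverse)
    (k : Nat) (hk : k < S.toList.length) :
    pvNearCond S (k : Int) =
      (decide (PySem.Str.len S - ((pvJ0 S.toList k : Nat) : Int) < 20) &&
        (match PySem.Str.pyGet? S ((pvJ0 S.toList k : Nat) : Int) with
         | some c => c == '(' || c == ','
         | none => false)) := by
  set T := S.toList with hT
  set j := pvJ0 T k with hj
  obtain ⟨hj1, hj2⟩ := pvJ0_bounds T k (by omega)
  have hrest : (PySem.Str.strip (PySem.Str.slice S (some (k : Int)) none)).toList = T.drop j := by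
    rw [PySem.Str.toList_strip, PySem.Str.toList_slice, PySem.Chars.slice_eq_listSlice,
      PySem.List.slice_from_natCast]
    show PySem.Chars.rstrip (PySem.Chars.lstrip (T.drop k)) = T.drop j
    unfold PySem.Chars.lstrip PySem.Chars.rstrip
    rw [pvDrop_dropWhile, ← hj, List.reverse_drop, pvDropWhile_take _ _ hS, ← List.reverse_drop,
      List.reverse_reverse]
  simp only [pvNearCond]
  rw [PySem.Str.len_eq, hrest, PySem.Str.startswith_eq, PySem.Str.startswith_eq, hrest,
    PySem.Str.len_eq, ← hT, PySem.Str.pyGet?_natCast, ← hT]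
  rcases Nat.lt_or_ge j T.length with hjL | hjL
  · rw [List.getElem?_eq_getElem hjL]
    dsimp only
    have hdrop : T.drop j = T[j] :: T.drop (j+1) := List.drop_eq_getElem_cons hjL
    have hsw1 : PySem.Chars.startswith (T.drop j) ("(".toList) = (T[j] == '(') := by
      apply Bool.eq_iff_iff.mpr
      rw [show ("(".toList) = ['('] from rfl, PySem.Chars.startswith_iff, hdrop, beq_iff_eq]
      constructor
      · intro h
        exact (List.cons_prefix_cons.mp h).1.symm
      · intro h
        exact List.cons_prefix_cons.mpr ⟨h.symm, List.nil_prefix⟩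
    have hsw2 : PySem.Chars.startswith (T.drop j) (",".toList) = (T[j] == ',') := by
      apply Bool.eq_iff_iff.mpr
      rw [show (",".toList) = [','] from rfl, PySem.Chars.startswith_iff, hdrop, beq_iff_eq]
      constructor
      · intro h
        exact (List.cons_prefix_cons.mp h).1.symm
      · intro h
        exact List.cons_prefix_cons.mpr ⟨h.symm, List.nil_prefix⟩
    have hlen : (T.drop j).length = T.length - j := List.length_drop
    rw [hsw1, hsw2, hlen]
    have hdec : (decide (((T.length - j : Nat) : Int) < 20)) =
        decide ((T.length : Int) - (j : Int) < 20) := by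
      apply decide_eq_decide.mpr
      omega
    rw [hdec]
  · have hje : j = T.length := by omega
    rw [hje, List.getElem?_eq_none le_rfl]
    have hnil : T.drop T.length = ([] : List Char) := by simp
    rw [hnil]
    dsimp only
    rw [show ("(".toList) = ['('] from rfl, show (",".toList) = [','] from rfl]
    simp
    exact ⟨by decide, by decide⟩

-- B's scan runs in lockstep with the reference countdown
theorem pvLockstep (S : String) (d : PySem.Dict String String)
    (hS : S.toList.reverse.dropWhile PySem.Chars.isspace = S.toList.reverse) :
    ∀ k, k ≤ S.toList.length → pvLoopB S d (pvJ0 S.toList k) k = pvSpecLoop S d k := by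
  intro k
  induction k with
  | zero => intro _; rfl
  | succ k ih =>
    intro hk
    rw [pvLoopB, pvSpecLoop]
    have hkL : k < S.toList.length := by omega
    have hget : PySem.Str.pyGet? S (k : Int) = some S.toList[k] := by
      rw [PySem.Str.pyGet?_natCast, List.getElem?_eq_getElem hkL]
    have hnxt' : (if PySem.Chars.isspace S.toList[k] then pvJ0 S.toList (k+1) else k) =
        pvJ0 S.toList k := by
      conv_rhs => rw [pvJ0]
      rw [dif_pos hkL]
    simp only [hget, hnxt', ← pvNearCond_eq_hit S hS k hkL]
    by_cases hc : pvNearCond S (k : Int) = true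
    · rw [if_pos hc, if_pos hc]
      cases hx : d.get? (PySem.Str.slice S none (some (k : Int)))
      · exact ih (by omega)
      · rfl
    · rw [if_neg hc, if_neg hc]
      exact ih (by omega)

-- ===== VERDICT (by name: the statement is the Claim_ definition above) =====
theorem find_best_pattern_py_spec : Claim_equal_find_best_pattern_py := by
  intro s td _
  unfold Spec_find_best_pattern_py find_best_pattern_py find_best_pattern_py_alt
  dsimp only
  set d := PySem.Dict.ofList td with hd
  set S := PySem.Str.strip s with hSdef
  set ps := PySem.List.sorted d.keys (fun p => PySem.Str.len p) true with hps
  have hpw : ps.Pairwise (fun a b => PySem.Str.len b ≤ PySem.Str.len a) :=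
    PySem.List.sorted_pairwise_rev d.keys (fun p => PySem.Str.len p)
  have hmem_keys : ∀ p : String, p ∈ ps ↔ p ∈ d.keys := by
    intro p
    rw [hps, PySem.List.mem_sorted]
  have h2 : ∀ p ∈ ps, (d.get? p).isSome := by
    intro p hp
    have hk : p ∈ d.keys := (hmem_keys p).mp hp
    cases hx : d.get? p
    · exact absurd hk ((PySem.Dict.get?_eq_none_iff_not_mem_keys d p).mp hx)
    · simp
  cases hx : d.get? S with
  | some v =>
    have hmem : S ∈ ps := by
      rw [hmem_keys]
      by_contra h
      rw [(PySem.Dict.get?_eq_none_iff_not_mem_keys d S).mpr h] at hx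
      exact Option.some_ne_none v hx.symm
    rw [pvLoopA_exact S d ps hpw hmem, hx]
  | none =>
    have hSrs : S.toList.reverse.dropWhile PySem.Chars.isspace = S.toList.reverse := by
      rw [hSdef, PySem.Str.toList_strip]
      show List.dropWhile _ ((PySem.Chars.rstrip (PySem.Chars.lstrip s.toList)).reverse) =
        (PySem.Chars.rstrip (PySem.Chars.lstrip s.toList)).reverse
      unfold PySem.Chars.rstrip
      rw [List.reverse_reverse]
      exact List.dropWhile_idempotent _ _
    rw [PySem.Str.len_eq, Int.toNat_natCast]
    show pvLoopA S d ps = pvLoopB S d S.toList.length S.toList.length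
    rw [show pvLoopB S d S.toList.length S.toList.length =
          pvLoopB S d (pvJ0 S.toList S.toList.length) S.toList.length from by rw [pvJ0_last],
        pvLockstep S d hSrs S.toList.length le_rfl]
    apply pvLoopA_near S d S.toList.length hx le_rfl ps hpw h2
    · intro n _ _ hsome
      rw [hmem_keys]
      by_contra h
      rw [(PySem.Dict.get?_eq_none_iff_not_mem_keys d _).mpr h] at hsome
      simp at hsome
    · intro p hp hsw _
      have hpre : p.toList <+: S.toList := (pvStartswith_iff S p).mp hsw
      rcases Nat.lt_or_ge p.toList.length S.toList.length with h | h
      · exact h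
      · exfalso
        have hpe : p = S := String.toList_inj.mp (hpre.eq_of_length (le_antisymm hpre.length_le h))
        have := h2 p hp
        rw [hpe, hx] at this
        simp at this
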